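-- pv_equiv track=rewrite | github.com/sangambartaula/alumni-networking-tool | scraper/archive/exa_pipeline/exa.py | _chunk_section_lines
-- ===== SOURCE A (Python) =====
-- def _chunk_section_lines(lines: list[str]) -> list[list[str]]:
--     chunks = []
--     current = []
--     for line in lines:
--         if line.startswith("###"):
--             if current:
--                 chunks.append(current)
--             current = [line]
--             continue
--         if current:
--             current.append(line)
--     if current:
--         chunks.append(current)
--     if not chunks and lines:
--         chunks.append(lines[:])
--     return chunks
-- ===== SOURCE B (Python) =====
-- def _chunk_section_lines(lines: list[str]) -> list[list[str]]:
--     # Consume the lines front-first via a reversed stack (top of stack = next line).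
--     rest = list(reversed(lines))
--     # Phase 1: drop the pre-header preamble.
--     while rest and not rest[-1].startswith("###"):
--         rest.pop()
--     if not rest:
--         return [list(lines)] if lines else []
--     # Phase 2: each chunk is a header followed by its non-header body.
--     chunks = []
--     while rest:
--         chunk = [rest.pop()]
--         while rest and not rest[-1].startswith("###"):
--             chunk.append(rest.pop())
--         chunks.append(chunk)
--     return chunks
-- ===== Notes on version B (the rewrite author's own statement) =====
-- stated objective: alternative
-- what changed: Replaces the single-pass chunks/current accumulator with a two-phase decomposition over a front-first stack of the lines: drop the pre-header preamble, then repeatedly take a header plus its run of non-header body lines to emit each chunk directly.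
import Mathlib
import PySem

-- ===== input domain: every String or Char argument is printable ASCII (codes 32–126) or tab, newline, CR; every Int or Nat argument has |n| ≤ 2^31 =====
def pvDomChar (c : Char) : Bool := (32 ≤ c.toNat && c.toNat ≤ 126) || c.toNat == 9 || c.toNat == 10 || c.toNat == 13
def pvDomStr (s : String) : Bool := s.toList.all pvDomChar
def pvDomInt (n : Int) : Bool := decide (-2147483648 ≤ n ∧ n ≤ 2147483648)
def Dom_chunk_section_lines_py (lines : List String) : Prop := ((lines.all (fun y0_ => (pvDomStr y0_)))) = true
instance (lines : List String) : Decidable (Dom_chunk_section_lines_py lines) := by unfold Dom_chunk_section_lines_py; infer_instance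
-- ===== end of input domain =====

-- B replaces A's chunks/current accumulator with a two-phase decomposition (drop the
-- preamble, then group each header with its non-header body); alternative, not faster.

-- ===== PORT A =====
def pvIsHdr (s : String) : Bool := PySem.Str.startswith s "###"

-- the body of A's for-loop, acting on the state (chunks, current)
def pvStepA (st : List (List String) × List String) (line : String) :
    List (List String) × List String :=
  if pvIsHdr line then
    ((if st.2.isEmpty then st.1 else st.1 ++ [st.2]), [line])
  else if st.2.isEmpty then st else (st.1, st.2 ++ [line])

-- the trailing 'if current: chunks.append(current)'
def pvFinish (st : List (List String) × List String) : List (List String) :=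
  if st.2.isEmpty then st.1 else st.1 ++ [st.2]

def chunk_section_lines_py (lines : List String) : List (List String) :=
  let st := lines.foldl pvStepA ([], [])
  let chunks := pvFinish st
  if chunks.isEmpty && !lines.isEmpty then chunks ++ [lines] else chunks

-- ===== PORT B =====
-- B's second while-loop: rest starts with a header; take its non-header body, recurse.
def pvGo (rest : List String) : List (List String) :=
  match rest with
  | [] => []
  | h :: t =>
      (h :: t.takeWhile (fun l => !pvIsHdr l)) :: pvGo (t.dropWhile (fun l => !pvIsHdr l))
termination_by rest.length
decreasing_by
  simpa using Nat.lt_succ_of_le (List.length_dropWhile_le _ _)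

def chunk_section_lines_py_alt (lines : List String) : List (List String) :=
  let rest := lines.dropWhile (fun l => !pvIsHdr l)
  if rest.isEmpty then (if lines.isEmpty then [] else [lines]) else pvGo rest

-- ===== PRECONDITION & SPEC =====
def Spec_chunk_section_lines_py (lines : List String) (out : List (List String)) : Prop := out = chunk_section_lines_py_alt lines
instance (lines : List String) (out : List (List String)) : Decidable (Spec_chunk_section_lines_py lines out) := by unfold Spec_chunk_section_lines_py; infer_instance

-- ===== CLAIM (what is proved, stated in full; the proofs are below) =====
def Claim_equal_chunk_section_lines_py : Prop := ∀ (lines : List String), Dom_chunk_section_lines_py lines → Spec_chunk_section_lines_py lines (chunk_section_lines_py lines)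

-- ===== LEMMAS AND PROOFS =====

-- With an empty current, non-header lines leave A's state unchanged.
theorem pv_fold_skip (chunks : List (List String)) (rest : List String)
    (h : ∀ l ∈ rest, pvIsHdr l = false) :
    rest.foldl pvStepA (chunks, []) = (chunks, []) := by
  induction rest with
  | nil => rfl
  | cons l rs ih =>
      have hl : pvIsHdr l = false := h l (List.mem_cons_self ..)
      simp only [List.foldl_cons, pvStepA, hl, Bool.false_eq_true, if_false, List.isEmpty_nil,
        if_true]
      exact ih (fun x hx => h x (List.mem_cons_of_mem _ hx))

-- With a nonempty current, A's remaining fold produces exactly B's grouping.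
theorem pv_fold_run (rest : List String) : ∀ (chunks : List (List String)) (cur : List String),
    cur ≠ [] →
    pvFinish (rest.foldl pvStepA (chunks, cur)) =
      chunks ++ (cur ++ rest.takeWhile (fun l => !pvIsHdr l)) ::
        pvGo (rest.dropWhile (fun l => !pvIsHdr l)) := by
  induction rest with
  | nil =>
      intro chunks cur hc
      simp [pvFinish, pvGo, List.isEmpty_iff, hc]
  | cons l rs ih =>
      intro chunks cur hc
      by_cases hl : pvIsHdr l = true
      · have h1 : rs.foldl pvStepA (chunks ++ [cur], [l]) =
            (l :: rs).foldl pvStepA (chunks, cur) := by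
          simp [pvStepA, hl, List.isEmpty_iff, hc]
        rw [← h1, ih (chunks ++ [cur]) [l] (by simp)]
        simp only [List.takeWhile_cons, List.dropWhile_cons, hl, Bool.not_true,
          Bool.false_eq_true, if_false]
        rw [pvGo]
        simp
      · have hl' : pvIsHdr l = false := by simpa using hl
        have h1 : rs.foldl pvStepA (chunks, cur ++ [l]) =
            (l :: rs).foldl pvStepA (chunks, cur) := by
          simp [pvStepA, hl', List.isEmpty_iff, hc]
        rw [← h1, ih chunks (cur ++ [l]) (by simp)]
        simp [List.takeWhile_cons, List.dropWhile_cons, hl']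

theorem pv_dropWhile_head (p : String → Bool) (l : List String) (h : String) (t : List String)
    (he : l.dropWhile p = h :: t) : p h = false := by
  induction l with
  | nil => simp at he
  | cons a as ih =>
      by_cases ha : p a
      · exact ih (by simpa [List.dropWhile_cons, ha] using he)
      · rw [List.dropWhile_cons, if_neg (by simpa using ha)] at he
        cases he; simpa using ha

-- ===== VERDICT (by name: the statement is the Claim_ definition above) =====
theorem chunk_section_lines_py_spec : Claim_equal_chunk_section_lines_py := by
  intro lines _
  unfold Spec_chunk_section_lines_py chunk_section_lines_py chunk_section_lines_py_alt
  have hsplit : lines = lines.takeWhile (fun l => !pvIsHdr l) ++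
      lines.dropWhile (fun l => !pvIsHdr l) := (List.takeWhile_append_dropWhile ..).symm
  have hpre : ∀ l ∈ lines.takeWhile (fun l => !pvIsHdr l), pvIsHdr l = false := by
    intro l hl
    have := List.mem_takeWhile_imp hl
    simpa using this
  have hfold : lines.foldl pvStepA ([], []) =
      (lines.dropWhile (fun l => !pvIsHdr l)).foldl pvStepA ([], []) := by
    conv_lhs => rw [hsplit]
    rw [List.foldl_append, pv_fold_skip [] _ hpre]
  cases hrest : lines.dropWhile (fun l => !pvIsHdr l) with
  | nil =>
      have hall : lines.foldl pvStepA ([], []) = ([], []) := by rw [hfold, hrest]; rfl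
      simp only [hall, hrest, pvFinish, List.isEmpty_nil, if_true, List.isEmpty_iff]
      cases lines <;> simp
  | cons h t =>
      have hh : pvIsHdr h = true := by
        have := pv_dropWhile_head (fun l => !pvIsHdr l) lines h t hrest
        simpa using this
      have hstep : pvStepA ([], []) h = ([], [h]) := by
        simp [pvStepA, hh]
      have hfin : pvFinish (lines.foldl pvStepA ([], [])) = pvGo (h :: t) := by
        rw [hfold, hrest, List.foldl_cons, hstep,
          pv_fold_run t [] [h] (by simp), pvGo]
        simp
      simp only [hfin, hrest, List.isEmpty_cons, Bool.false_and]
      rw [pvGo]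
      simp [pvGo]
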